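-- pv_equiv track=rewrite | github.com/jyoung88888/crain_safety_system | ai_server/rtsp_service/lib/zone_utils.py | aggregate_max
-- ===== SOURCE A (Python) =====
-- def aggregate_max(cam_data, zones, keys):
--     """각 카메라의 카운트를 MAX로 집계 (중복 카운팅 방지)."""
--     agg = {z: {k: 0 for k in keys} for z in zones}
--     for z in zones:
--         for k in keys:
--             values = [cam_data[cid][z][k] for cid in cam_data if z in cam_data[cid]]
--             if values:
--                 agg[z][k] = max(values)
--     return agg
-- ===== SOURCE B (Python) =====
-- def aggregate_max(cam_data, zones, keys):
--     """Single camera-major pass: fold every camera's per-zone counts into a flat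
--     (zone, key) -> running-max table, then assemble the result dicts from it."""
--     zone_set = set(zones)
--     best = {}
--     for zdata in cam_data.values():
--         for z, kd in zdata.items():
--             if z not in zone_set:
--                 continue
--             for k in keys:
--                 v = kd[k]
--                 cur = best.get((z, k))
--                 if cur is None or v > cur:
--                     best[(z, k)] = v
--     return {z: {k: best.get((z, k), 0) for k in keys} for z in zones}
-- ===== Notes on version B (the rewrite author's own statement) =====
-- stated objective: alternative
-- what changed: A rescans all cameras once per (zone, key) pair (|zones|*|keys| passes over cam_data, with a fresh membership test, lookup and list build each time); B makes a single camera-major pass that folds every camera's zone entries into one flat (zone, key) -> running-max table, then assembles the result dicts from that table.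
import Mathlib
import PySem

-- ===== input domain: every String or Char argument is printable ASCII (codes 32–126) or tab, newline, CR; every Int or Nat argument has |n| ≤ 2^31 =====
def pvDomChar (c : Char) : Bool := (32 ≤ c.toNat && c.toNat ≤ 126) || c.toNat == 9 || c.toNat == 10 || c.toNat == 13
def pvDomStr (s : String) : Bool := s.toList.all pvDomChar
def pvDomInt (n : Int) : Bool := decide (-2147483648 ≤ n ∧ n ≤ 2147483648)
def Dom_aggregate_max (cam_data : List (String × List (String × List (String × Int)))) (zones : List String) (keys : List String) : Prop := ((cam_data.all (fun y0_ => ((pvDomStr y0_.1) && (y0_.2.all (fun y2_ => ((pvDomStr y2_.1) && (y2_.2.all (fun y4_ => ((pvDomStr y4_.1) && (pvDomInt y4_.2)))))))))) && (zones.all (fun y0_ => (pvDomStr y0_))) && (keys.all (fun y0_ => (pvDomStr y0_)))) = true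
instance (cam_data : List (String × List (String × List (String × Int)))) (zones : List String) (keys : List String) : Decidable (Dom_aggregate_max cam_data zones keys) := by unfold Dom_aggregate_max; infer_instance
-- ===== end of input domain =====

-- B replaces A's per-(zone,key) rescans of all cameras by ONE camera-major pass building a
-- flat (zone,key) -> running-max table, then assembles the result from it (objective: alternative).


-- ===== PORT A =====
-- first-match lookup in an association list = Python dict subscript / 'in' test (dicts have unique keys)
def pyLookup {α : Type} (l : List (String × α)) (s : String) : Option α :=
  match l with
  | [] => none
  | q :: t => if q.1 = s then some q.2 else pyLookup t s

def aggregate_max (cam_data : List (String × List (String × List (String × Int)))) (zones : List String) (keys : List String) : List (String × List (String × Int)) :=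
  -- agg = {z: {k: 0 for k in keys} for z in zones}
  let agg0 : PySem.Dict String (PySem.Dict String Int) :=
    zones.foldl (fun a z => a.insert z (keys.foldl (fun d k => d.insert k 0) PySem.Dict.empty)) PySem.Dict.empty
  let agg :=
    zones.foldl (fun a z =>
      keys.foldl (fun a k =>
        -- values = [cam_data[cid][z][k] for cid in cam_data if z in cam_data[cid]]
        let values : List Int :=
          (cam_data.map Prod.fst).filterMap (fun cid =>
            match pyLookup cam_data cid with
            | none => none
            | some zd =>
              match pyLookup zd z with
              | none => none
              | some kd => some ((pyLookup kd k).getD 0))   -- kd[k]; KeyError excluded by Pre_ (stand-in 0)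
        match PySem.List.max? values (fun v => v) with      -- if values: agg[z][k] = max(values)
        | some m => a.modify z PySem.Dict.empty (fun row => row.insert k m)
        | none => a) a) agg0
  agg.items.map (fun p => (p.1, p.2.items))

-- ===== PORT B =====
def aggregate_max_alt (cam_data : List (String × List (String × List (String × Int)))) (zones : List String) (keys : List String) : List (String × List (String × Int)) :=
  let zone_set : PySem.Set String := PySem.Set.ofList zones
  -- one pass over the cameras: best[(z, k)] = running max
  let best : PySem.Dict (String × String) Int :=
    cam_data.foldl (fun best p =>
      p.2.foldl (fun best q =>
        if PySem.Set.contains zone_set q.1 then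
          keys.foldl (fun best k =>
            let v : Int := (pyLookup q.2 k).getD 0          -- kd[k]; KeyError excluded by Pre_ (stand-in 0)
            match best.get? (q.1, k) with
            | none => best.insert (q.1, k) v
            | some cur => if v > cur then best.insert (q.1, k) v else best) best
        else best) best) PySem.Dict.empty
  -- {z: {k: best.get((z, k), 0) for k in keys} for z in zones}
  ((zones.foldl (fun a z =>
      a.insert z (keys.foldl (fun d k => d.insert k (best.getD (z, k) 0)) PySem.Dict.empty))
    (PySem.Dict.empty : PySem.Dict String (PySem.Dict String Int))).items).map (fun p => (p.1, p.2.items))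

-- ===== PRECONDITION & SPEC =====
-- Pre_ excludes (a) association lists with duplicate keys, which no Python dict can contain (there A's
-- keys-then-lookup iteration order is accidental), and (b) inputs where some k ∈ keys is missing from a
-- cam_data[cid][z] with z ∈ zones — on those Python A raises KeyError (and so does B).
def Pre_aggregate_max (cam_data : List (String × List (String × List (String × Int)))) (zones : List String) (keys : List String) : Prop :=
  (cam_data.map Prod.fst).Nodup ∧
  ∀ p ∈ cam_data, (p.2.map Prod.fst).Nodup ∧
    ∀ q ∈ p.2, q.1 ∈ zones → ∀ k ∈ keys, k ∈ q.2.map Prod.fst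
instance (cam_data : List (String × List (String × List (String × Int)))) (zones : List String) (keys : List String) : Decidable (Pre_aggregate_max cam_data zones keys) := by unfold Pre_aggregate_max; infer_instance

def pvWitness_aggregate_max : (List (String × List (String × List (String × Int)))) × List String × List String :=
  ([("c1", [("z1", [("k1", (2 : Int)), ("k2", (-3 : Int))])]), ("c2", [("z1", [("k1", (1 : Int)), ("k2", (5 : Int))])])], ["z1", "z2"], ["k1", "k2"])

def Spec_aggregate_max (cam_data : List (String × List (String × List (String × Int)))) (zones : List String) (keys : List String) (out : List (String × List (String × Int))) : Prop := out = aggregate_max_alt cam_data zones keys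
instance (cam_data : List (String × List (String × List (String × Int)))) (zones : List String) (keys : List String) (out : List (String × List (String × Int))) : Decidable (Spec_aggregate_max cam_data zones keys out) := by unfold Spec_aggregate_max; infer_instance

-- ===== CLAIM (what is proved, stated in full; the proofs are below) =====
def Claim_equal_aggregate_max : Prop := ∀ (cam_data : List (String × List (String × List (String × Int)))) (zones : List String) (keys : List String), Dom_aggregate_max cam_data zones keys → Pre_aggregate_max cam_data zones keys → Spec_aggregate_max cam_data zones keys (aggregate_max cam_data zones keys)

-- ===== LEMMAS AND PROOFS =====

-- the per-(zone,key) list of camera values, read off the entries directly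
def pvVals (cam_data : List (String × List (String × List (String × Int)))) (z k : String) : List Int :=
  cam_data.filterMap (fun p =>
    match pyLookup p.2 z with
    | none => none
    | some kd => some ((pyLookup kd k).getD 0))

-- A's final cell value
def pvFin (cam_data : List (String × List (String × List (String × Int)))) (z k : String) : Int :=
  (PySem.List.max? (pvVals cam_data z k) (fun v => v)).getD 0

-- B's running-max step
def pvStep (acc : Option Int) (v : Int) : Option Int :=
  match acc with
  | none => some v
  | some c => some (if v > c then v else c)

theorem pvStep_idem (a : Option Int) (v : Int) : pvStep (pvStep a v) v = pvStep a v := by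
  rcases a with _ | c <;> simp only [pvStep] <;> split_ifs <;> simp_all

-- foldl of the first-extremum step = PySem.List.max?
theorem pvStep_foldl_some (t : List Int) (c : Int) :
    t.foldl pvStep (some c) = some (t.foldl max c) := by
  induction t generalizing c with
  | nil => rfl
  | cons x t ih =>
    simp only [List.foldl_cons]
    have h : pvStep (some c) x = some (max c x) := by
      simp only [pvStep]
      split_ifs <;> (congr 1; omega)
    rw [h, ih]

theorem pvStep_foldl_eq_max? (l : List Int) :
    l.foldl pvStep none = PySem.List.max? l (fun v => v) := by
  cases l with
  | nil => rfl
  | cons x t =>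
    have h0 : pvStep none x = some x := rfl
    simp only [List.foldl_cons, h0]
    rw [pvStep_foldl_some, PySem.List.max?_id_cons]

-- A's keys-then-lookup comprehension = direct scan of the entries, when keys are unique
theorem pv_values_eq (cam_data : List (String × List (String × List (String × Int)))) (z k : String)
    (h : (cam_data.map Prod.fst).Nodup) :
    (cam_data.map Prod.fst).filterMap (fun cid =>
      match pyLookup cam_data cid with
      | none => none
      | some zd =>
        match pyLookup zd z with
        | none => none
        | some kd => some ((pyLookup kd k).getD 0)) = pvVals cam_data z k := by
  induction cam_data with
  | nil => rfl
  | cons p t ih =>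
    simp only [List.map_cons, List.nodup_cons] at h
    obtain ⟨hp, ht⟩ := h
    have hhead : pyLookup (p :: t) p.1 = some p.2 := by simp [pyLookup]
    have hcongr : ∀ cid ∈ t.map Prod.fst,
        (match pyLookup (p :: t) cid with
         | none => (none : Option Int)
         | some zd =>
           match pyLookup zd z with
           | none => none
           | some kd => some ((pyLookup kd k).getD 0)) =
        (match pyLookup t cid with
         | none => (none : Option Int)
         | some zd =>
           match pyLookup zd z with
           | none => none
           | some kd => some ((pyLookup kd k).getD 0)) := by
      intro cid hcid
      have hne : p.1 ≠ cid := fun e => hp (e ▸ hcid)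
      simp only [pyLookup, if_neg hne]
    simp only [List.map_cons, List.filterMap_cons, hhead, pvVals,
      List.filterMap_congr hcongr, ih ht]

-- generic: get? after a foldl-insert whose value depends only on the inserted key
theorem pv_get?_foldl_insert {ν : Type} (l : List String) (v : String → ν)
    (d : PySem.Dict String ν) (x : String) :
    (l.foldl (fun d k => d.insert k (v k)) d).get? x = if x ∈ l then some (v x) else d.get? x := by
  induction l generalizing d with
  | nil => simp
  | cons k t ih =>
    simp only [List.foldl_cons, ih, PySem.Dict.get?_insert, List.mem_cons]
    by_cases hx : x ∈ t
    · simp [hx]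
    · by_cases he : x = k <;> simp [hx, he]

theorem pyLookup_eq_none_of_not_mem {α : Type} {l : List (String × α)} {s : String}
    (h : s ∉ l.map Prod.fst) : pyLookup l s = none := by
  induction l with
  | nil => rfl
  | cons q t ih =>
    simp only [List.map_cons, List.mem_cons, not_or] at h
    have hne : ¬ q.1 = s := fun e => h.1 e.symm
    simp only [pyLookup, if_neg hne]
    exact ih h.2

-- ===== B side characterisation =====

theorem pv_best_keysloop (z k : String) (q : String × List (String × Int))
    (ks : List String) (bst : PySem.Dict (String × String) Int) :
    ((ks.foldl (fun best k =>
        let v : Int := (pyLookup q.2 k).getD 0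
        match best.get? (q.1, k) with
        | none => best.insert (q.1, k) v
        | some cur => if v > cur then best.insert (q.1, k) v else best) bst)).get? (z, k) =
      if q.1 = z ∧ k ∈ ks then pvStep (bst.get? (z, k)) ((pyLookup q.2 k).getD 0)
      else bst.get? (z, k) := by
  induction ks generalizing bst with
  | nil => simp
  | cons k' ks ih =>
    simp only [List.foldl_cons]
    have hstep : ((match bst.get? (q.1, k') with
        | none => bst.insert (q.1, k') ((pyLookup q.2 k').getD 0)
        | some cur => if (pyLookup q.2 k').getD 0 > cur then bst.insert (q.1, k') ((pyLookup q.2 k').getD 0) else bst) : PySem.Dict (String × String) Int).get? (z, k) =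
        if q.1 = z ∧ k = k' then pvStep (bst.get? (z, k)) ((pyLookup q.2 k').getD 0)
        else bst.get? (z, k) := by
      by_cases hzk : q.1 = z ∧ k = k'
      · obtain ⟨h1, h2⟩ := hzk
        subst h1; subst h2
        cases hb : bst.get? (q.1, k) with
        | none => simp [pvStep]
        | some cur =>
          by_cases hv : (pyLookup q.2 k).getD 0 > cur <;>
            simp [hb, hv, pvStep]
      · have hne : (z, k) ≠ (q.1, k') := by
          intro e
          rw [Prod.mk.injEq] at e
          exact hzk ⟨e.1.symm, e.2⟩
        rw [if_neg hzk]
        cases hb : bst.get? (q.1, k') with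
        | none => rw [PySem.Dict.get?_insert, if_neg hne]
        | some cur =>
          show (if (pyLookup q.2 k').getD 0 > cur then
              bst.insert (q.1, k') ((pyLookup q.2 k').getD 0) else bst).get? (z, k) = bst.get? (z, k)
          by_cases hv : (pyLookup q.2 k').getD 0 > cur
          · rw [if_pos hv, PySem.Dict.get?_insert, if_neg hne]
          · rw [if_neg hv]
    rw [ih, hstep]
    by_cases hq : q.1 = z
    · by_cases hk1 : k = k'
      · subst hk1
        by_cases hk2 : k ∈ ks <;>
          simp [hq, hk2, pvStep_idem]
      · by_cases hk2 : k ∈ ks <;>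
          simp [hq, hk1, hk2]
    · simp [hq]

-- one camera's zone dict folded into the table, seen at one (z, k)
theorem pv_best_zdloop (zones keys : List String) (z k : String) (hz : z ∈ zones) (hk : k ∈ keys)
    (entries : List (String × List (String × Int))) (bst : PySem.Dict (String × String) Int) :
    ((entries.foldl (fun best q =>
        if PySem.Set.contains (PySem.Set.ofList zones) q.1 then
          keys.foldl (fun best k =>
            let v : Int := (pyLookup q.2 k).getD 0
            match best.get? (q.1, k) with
            | none => best.insert (q.1, k) v
            | some cur => if v > cur then best.insert (q.1, k) v else best) best
        else best) bst)).get? (z, k) =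
      (entries.filterMap (fun q =>
        if q.1 = z then some ((pyLookup q.2 k).getD 0) else none)).foldl pvStep (bst.get? (z, k)) := by
  induction entries generalizing bst with
  | nil => rfl
  | cons q t ih =>
    simp only [List.foldl_cons, List.filterMap_cons]
    by_cases hq : q.1 = z
    · have hc : PySem.Set.contains (PySem.Set.ofList zones) q.1 = true := by
        rw [PySem.Set.contains_iff, PySem.Set.mem_ofList, hq]; exact hz
      rw [if_pos hc, if_pos hq, List.foldl_cons, ih]
      congr 1
      rw [pv_best_keysloop z k q keys bst, if_pos ⟨hq, hk⟩]
    · rw [if_neg hq]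
      by_cases hc : PySem.Set.contains (PySem.Set.ofList zones) q.1 = true
      · rw [if_pos hc, ih]
        congr 1
        rw [pv_best_keysloop z k q keys bst]
        simp [hq]
      · rw [if_neg hc, ih]

-- B's flat table holds the running max of A's value list, for every queried (z, k)
theorem pv_best_get? (cam_data : List (String × List (String × List (String × Int))))
    (zones keys : List String) (z k : String) (hz : z ∈ zones) (hk : k ∈ keys)
    (bst : PySem.Dict (String × String) Int) :
    ((cam_data.foldl (fun best p =>
        p.2.foldl (fun best q =>
          if PySem.Set.contains (PySem.Set.ofList zones) q.1 then
            keys.foldl (fun best k =>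
              let v : Int := (pyLookup q.2 k).getD 0
              match best.get? (q.1, k) with
              | none => best.insert (q.1, k) v
              | some cur => if v > cur then best.insert (q.1, k) v else best) best
          else best) best) bst)).get? (z, k) =
      (cam_data.flatMap (fun p => p.2.filterMap (fun q =>
        if q.1 = z then some ((pyLookup q.2 k).getD 0) else none))).foldl pvStep (bst.get? (z, k)) := by
  induction cam_data generalizing bst with
  | nil => rfl
  | cons p t ih =>
    simp only [List.foldl_cons, List.flatMap_cons, List.foldl_append]
    rw [ih, pv_best_zdloop zones keys z k hz hk]

-- under Pre_'s inner Nodup, one zone dict's matching entries are exactly its first-match lookup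
theorem pv_zd_filterMap (z k : String) (zd : List (String × List (String × Int)))
    (hn : (zd.map Prod.fst).Nodup) :
    zd.filterMap (fun q => if q.1 = z then some ((pyLookup q.2 k).getD 0) else none) =
    (match pyLookup zd z with
     | none => ([] : List Int)
     | some kd => [(pyLookup kd k).getD 0]) := by
  revert hn
  induction zd with
  | nil => intro _; rfl
  | cons q t ih =>
    intro hn
    simp only [List.map_cons, List.nodup_cons] at hn
    simp only [List.filterMap_cons, pyLookup]
    by_cases hq : q.1 = z
    · have hzt : z ∉ t.map Prod.fst := hq ▸ hn.1
      simp only [if_pos hq, ih hn.2, pyLookup_eq_none_of_not_mem hzt]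
    · simp only [if_neg hq, ih hn.2]

-- under Pre_'s inner Nodup, the flat scan collects exactly A's per-camera lookups
theorem pv_flat_eq_vals (cam_data : List (String × List (String × List (String × Int))))
    (z k : String)
    (h : ∀ p ∈ cam_data, (p.2.map Prod.fst).Nodup) :
    (cam_data.flatMap (fun p => p.2.filterMap (fun q =>
        if q.1 = z then some ((pyLookup q.2 k).getD 0) else none))) = pvVals cam_data z k := by
  induction cam_data with
  | nil => rfl
  | cons p t ih =>
    have ht : ∀ p' ∈ t, (p'.2.map Prod.fst).Nodup := fun p' hp' => h p' (List.mem_cons_of_mem _ hp')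
    simp only [List.flatMap_cons, pv_zd_filterMap z k p.2 (h p List.mem_cons_self),
      pvVals, List.filterMap_cons]
    cases hpz : pyLookup p.2 z with
    | none => simpa [pvVals] using ih ht
    | some kd => simpa [pvVals] using congrArg (fun l => ((pyLookup kd k).getD 0) :: l) (ih ht)

-- ===== A side characterisation =====

-- one inner (keys) pass of A's update loop, seen through getD
theorem pv_TK (cam_data : List (String × List (String × List (String × Int)))) (z : String)
    (ks : List String) (a : PySem.Dict String (PySem.Dict String Int))
    (hc : a.contains z = true)
    (hrow : ∀ k ∈ ks, (a.getD z PySem.Dict.empty).contains k = true) :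
    let a' := ks.foldl (fun a k =>
      match PySem.List.max? (pvVals cam_data z k) (fun v => v) with
      | some m => a.modify z PySem.Dict.empty (fun row => row.insert k m)
      | none => a) a
    a'.keys = a.keys ∧
    (∀ z', z' ≠ z → a'.getD z' PySem.Dict.empty = a.getD z' PySem.Dict.empty) ∧
    (a'.getD z PySem.Dict.empty).keys = (a.getD z PySem.Dict.empty).keys ∧
    (∀ k', (a'.getD z PySem.Dict.empty).getD k' 0 =
      if k' ∈ ks ∧ (PySem.List.max? (pvVals cam_data z k') (fun v => v)).isSome then pvFin cam_data z k'
      else (a.getD z PySem.Dict.empty).getD k' 0) := by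
  induction ks generalizing a with
  | nil => exact ⟨rfl, fun _ _ => rfl, rfl, fun k' => by simp⟩
  | cons k ks ih =>
    simp only [List.foldl_cons]
    cases hm : PySem.List.max? (pvVals cam_data z k) (fun v => v) with
    | none =>
      obtain ⟨c1, c2, c3, c4⟩ := ih a hc (fun k'' hk'' => hrow k'' (List.mem_cons_of_mem _ hk''))
      refine ⟨c1, c2, c3, fun k' => ?_⟩
      rw [c4 k']
      by_cases hk' : k' = k
      · subst hk'; simp [hm]
      · simp [List.mem_cons, hk']
    | some m =>
      have hrk : (a.getD z PySem.Dict.empty).contains k = true := hrow k List.mem_cons_self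
      set a1 := a.modify z PySem.Dict.empty (fun row => row.insert k m) with ha1
      have hc1 : a1.contains z = true := by
        rw [ha1, PySem.Dict.contains_modify]; simp
      have hkeys1 : a1.keys = a.keys := by
        rw [ha1, PySem.Dict.keys_modify, PySem.Dict.keys_insert_of_contains _ _ hc]
      have hrowz : a1.getD z PySem.Dict.empty = (a.getD z PySem.Dict.empty).insert k m := by
        rw [ha1, PySem.Dict.getD_modify, if_pos rfl]
      have hrowne : ∀ z', z' ≠ z → a1.getD z' PySem.Dict.empty = a.getD z' PySem.Dict.empty := by
        intro z' hz'
        rw [ha1, PySem.Dict.getD_modify, if_neg hz']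
      have hrowcont : ∀ k'' ∈ ks, (a1.getD z PySem.Dict.empty).contains k'' = true := by
        intro k'' hk''
        rw [hrowz, PySem.Dict.contains_insert, hrow k'' (List.mem_cons_of_mem _ hk''), Bool.or_true]
      obtain ⟨c1, c2, c3, c4⟩ := ih a1 hc1 hrowcont
      refine ⟨c1.trans hkeys1, fun z' hz' => (c2 z' hz').trans (hrowne z' hz'),
        c3.trans (by rw [hrowz, PySem.Dict.keys_insert_of_contains _ _ hrk]), fun k' => ?_⟩
      rw [c4 k', hrowz, PySem.Dict.getD_insert]
      have hfin : pvFin cam_data z k = m := by rw [pvFin, hm]; rfl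
      by_cases hk1 : k' ∈ ks ∧ (PySem.List.max? (pvVals cam_data z k') (fun v => v)).isSome
      · rw [if_pos hk1, if_pos ⟨List.mem_cons_of_mem _ hk1.1, hk1.2⟩]
      · rw [if_neg hk1]
        by_cases hk2 : k' = k
        · subst hk2
          rw [if_pos rfl, if_pos ⟨List.mem_cons_self, by rw [hm]; rfl⟩, hfin]
        · rw [if_neg hk2, if_neg (by
            intro hcon
            rcases List.mem_cons.mp hcon.1 with h' | h'
            · exact hk2 h'
            · exact hk1 ⟨h', hcon.2⟩)]


-- the outer (zones) loop of A's update phase, seen through getD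
theorem pv_TZ (cam_data : List (String × List (String × List (String × Int)))) (keys : List String)
    (zs : List String) (a : PySem.Dict String (PySem.Dict String Int))
    (h1 : ∀ z ∈ zs, a.contains z = true)
    (h2 : ∀ z, a.contains z = true → (a.getD z PySem.Dict.empty).keys = PySem.Set.ofList keys)
    (h3 : ∀ z k, a.contains z = true → k ∈ keys →
      ((a.getD z PySem.Dict.empty).getD k 0 = 0 ∨ (a.getD z PySem.Dict.empty).getD k 0 = pvFin cam_data z k)) :
    let a' := zs.foldl (fun a z =>
      keys.foldl (fun a k =>
        match PySem.List.max? (pvVals cam_data z k) (fun v => v) with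
        | some m => a.modify z PySem.Dict.empty (fun row => row.insert k m)
        | none => a) a) a
    a'.keys = a.keys ∧
    (∀ z, a.contains z = true → (a'.getD z PySem.Dict.empty).keys = PySem.Set.ofList keys) ∧
    (∀ z k, a.contains z = true → k ∈ keys →
      ((a'.getD z PySem.Dict.empty).getD k 0 = 0 ∨ (a'.getD z PySem.Dict.empty).getD k 0 = pvFin cam_data z k)) ∧
    (∀ z k, a.contains z = true → k ∈ keys →
      (a.getD z PySem.Dict.empty).getD k 0 = pvFin cam_data z k →
      (a'.getD z PySem.Dict.empty).getD k 0 = pvFin cam_data z k) ∧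
    (∀ z ∈ zs, ∀ k ∈ keys, (a'.getD z PySem.Dict.empty).getD k 0 = pvFin cam_data z k) := by
  induction zs generalizing a with
  | nil =>
    exact ⟨rfl, fun z hz => h2 z hz, h3, fun _ _ _ _ h => h, by simp⟩
  | cons z zs ih =>
    simp only [List.foldl_cons]
    have hcz : a.contains z = true := h1 z List.mem_cons_self
    have hrow : ∀ k ∈ keys, (a.getD z PySem.Dict.empty).contains k = true := by
      intro k hk
      rw [PySem.Dict.contains_iff_mem_keys, h2 z hcz, PySem.Set.mem_ofList]
      exact hk
    obtain ⟨k1, k2, k3, k4⟩ := pv_TK cam_data z keys a hcz hrow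
    set a1 := keys.foldl (fun a k =>
      match PySem.List.max? (pvVals cam_data z k) (fun v => v) with
      | some m => a.modify z PySem.Dict.empty (fun row => row.insert k m)
      | none => a) a with ha1
    have hcont : ∀ z', a1.contains z' = a.contains z' := by
      intro z'
      rw [Bool.eq_iff_iff, PySem.Dict.contains_iff_mem_keys, PySem.Dict.contains_iff_mem_keys, k1]
    -- the row of z is final after this pass
    have hfinz : ∀ k ∈ keys, (a1.getD z PySem.Dict.empty).getD k 0 = pvFin cam_data z k := by
      intro k hk
      rw [k4 k]
      by_cases hs : (PySem.List.max? (pvVals cam_data z k) (fun v => v)).isSome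
      · rw [if_pos ⟨hk, hs⟩]
      · rw [if_neg (fun hcon => hs hcon.2)]
        have hnone : PySem.List.max? (pvVals cam_data z k) (fun v => v) = none :=
          Option.not_isSome_iff_eq_none.mp (by simpa using hs)
        have hfin0 : pvFin cam_data z k = 0 := by rw [pvFin, hnone]; rfl
        rcases h3 z k hcz hk with h0 | h0 <;> rw [h0, hfin0]
    have h1' : ∀ z' ∈ zs, a1.contains z' = true := by
      intro z' hz'
      rw [hcont]; exact h1 z' (List.mem_cons_of_mem _ hz')
    have h2' : ∀ z', a1.contains z' = true → (a1.getD z' PySem.Dict.empty).keys = PySem.Set.ofList keys := by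
      intro z' hz'
      rw [hcont] at hz'
      by_cases he : z' = z
      · subst he; rw [k3]; exact h2 z' hz'
      · rw [k2 z' he]; exact h2 z' hz'
    have h3' : ∀ z' k, a1.contains z' = true → k ∈ keys →
        ((a1.getD z' PySem.Dict.empty).getD k 0 = 0 ∨ (a1.getD z' PySem.Dict.empty).getD k 0 = pvFin cam_data z' k) := by
      intro z' k hz' hk
      rw [hcont] at hz'
      by_cases he : z' = z
      · subst he; right; exact hfinz k hk
      · rw [k2 z' he]; exact h3 z' k hz' hk
    obtain ⟨c1, c2, c3, c4, c5⟩ := ih a1 h1' h2' h3'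
    refine ⟨c1.trans k1, ?_, ?_, ?_, ?_⟩
    · intro z' hz'
      exact c2 z' (by rw [hcont]; exact hz')
    · intro z' k hz' hk
      exact c3 z' k (by rw [hcont]; exact hz') hk
    · intro z' k hz' hk hfix
      refine c4 z' k (by rw [hcont]; exact hz') hk ?_
      by_cases he : z' = z
      · subst he; exact hfinz k hk
      · rw [k2 z' he]; exact hfix
    · intro z' hz' k hk
      rcases List.mem_cons.mp hz' with he | he
      · subst he
        exact c4 z' k (by rw [hcont]; exact hcz) hk (hfinz k hk)
      · exact c5 z' he k hk

-- the two ports build the same dict-of-dicts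
theorem pv_ports_eq (cam_data : List (String × List (String × List (String × Int))))
    (zones keys : List String)
    (hinner : ∀ p ∈ cam_data, (p.2.map Prod.fst).Nodup) :
    (zones.foldl (fun a z =>
      keys.foldl (fun a k =>
        match PySem.List.max? (pvVals cam_data z k) (fun v => v) with
        | some m => a.modify z PySem.Dict.empty (fun row => row.insert k m)
        | none => a) a)
      (zones.foldl (fun a z =>
        a.insert z (keys.foldl (fun d k => d.insert k 0) PySem.Dict.empty)) PySem.Dict.empty)) =
    (zones.foldl (fun a z =>
      a.insert z (keys.foldl (fun d k =>
        d.insert k ((cam_data.foldl (fun best p =>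
          p.2.foldl (fun best q =>
            if PySem.Set.contains (PySem.Set.ofList zones) q.1 then
              keys.foldl (fun best k =>
                let v : Int := (pyLookup q.2 k).getD 0
                match best.get? (q.1, k) with
                | none => best.insert (q.1, k) v
                | some cur => if v > cur then best.insert (q.1, k) v else best) best
            else best) best) PySem.Dict.empty).getD (z, k) 0)) PySem.Dict.empty))
      (PySem.Dict.empty : PySem.Dict String (PySem.Dict String Int))) := by
  -- names for the pieces
  set rowInit : PySem.Dict String Int :=
    keys.foldl (fun d k => d.insert k 0) PySem.Dict.empty with hrowInit
  set best : PySem.Dict (String × String) Int :=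
    cam_data.foldl (fun best p =>
      p.2.foldl (fun best q =>
        if PySem.Set.contains (PySem.Set.ofList zones) q.1 then
          keys.foldl (fun best k =>
            let v : Int := (pyLookup q.2 k).getD 0
            match best.get? (q.1, k) with
            | none => best.insert (q.1, k) v
            | some cur => if v > cur then best.insert (q.1, k) v else best) best
        else best) best) PySem.Dict.empty with hbestdef
  -- row-init facts
  have hRkeys : rowInit.keys = PySem.Set.ofList keys := by
    rw [hrowInit, PySem.Dict.keys_foldl_insert keys (fun _ k => 0) PySem.Dict.empty,
      PySem.Dict.keys_empty, PySem.Set.update_nil_left]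
  have hRgetD : ∀ k, rowInit.getD k 0 = 0 := by
    intro k
    rw [PySem.Dict.getD_eq_get?_getD, hrowInit,
      pv_get?_foldl_insert keys (fun _ => (0 : Int)) PySem.Dict.empty k]
    split_ifs <;> simp [PySem.Dict.get?_empty]
  -- the initial aggregate
  have hA0get : ∀ z, (zones.foldl (fun a z => a.insert z rowInit) PySem.Dict.empty).get? z =
      if z ∈ zones then some rowInit else none := by
    intro z
    rw [pv_get?_foldl_insert zones (fun _ => rowInit) PySem.Dict.empty z]
    split_ifs <;> simp [PySem.Dict.get?_empty]
  have hA0keys : (zones.foldl (fun a z => a.insert z rowInit) PySem.Dict.empty).keys =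
      PySem.Set.ofList zones := by
    rw [PySem.Dict.keys_foldl_insert zones (fun _ _ => rowInit) PySem.Dict.empty,
      PySem.Dict.keys_empty, PySem.Set.update_nil_left]
  have hA0contains : ∀ z, (zones.foldl (fun a z => a.insert z rowInit) PySem.Dict.empty).contains z = true ↔ z ∈ zones := by
    intro z
    rw [PySem.Dict.contains_iff_mem_keys, hA0keys, PySem.Set.mem_ofList]
  have hA0getD : ∀ z ∈ zones, (zones.foldl (fun a z => a.insert z rowInit) PySem.Dict.empty).getD z PySem.Dict.empty = rowInit := by
    intro z hz
    rw [PySem.Dict.getD_eq_get?_getD, hA0get z, if_pos hz]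
    rfl
  -- characterise A's result
  obtain ⟨c1, c2, c3, c4, c5⟩ := pv_TZ cam_data keys zones
    (zones.foldl (fun a z => a.insert z rowInit) PySem.Dict.empty)
    (fun z hz => (hA0contains z).mpr hz)
    (fun z hz => by rw [hA0getD z ((hA0contains z).mp hz)]; exact hRkeys)
    (fun z k hz hk => by rw [hA0getD z ((hA0contains z).mp hz)]; left; exact hRgetD k)
  -- characterise B's table
  have hbest : ∀ z ∈ zones, ∀ k ∈ keys, best.getD (z, k) 0 = pvFin cam_data z k := by
    intro z hz k hk
    rw [PySem.Dict.getD_eq_get?_getD, hbestdef,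
      pv_best_get? cam_data zones keys z k hz hk PySem.Dict.empty, PySem.Dict.get?_empty,
      pv_flat_eq_vals cam_data z k hinner, pvStep_foldl_eq_max?, pvFin]
  -- characterise B's assembly
  have hDBget : ∀ z, (zones.foldl (fun a z =>
      a.insert z (keys.foldl (fun d k => d.insert k (best.getD (z, k) 0)) PySem.Dict.empty))
      (PySem.Dict.empty : PySem.Dict String (PySem.Dict String Int))).get? z =
      if z ∈ zones then
        some (keys.foldl (fun d k => d.insert k (best.getD (z, k) 0)) PySem.Dict.empty) else none := by
    intro z
    rw [pv_get?_foldl_insert zones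
      (fun z => keys.foldl (fun d k => d.insert k (best.getD (z, k) 0)) PySem.Dict.empty)
      PySem.Dict.empty z]
    split_ifs <;> simp [PySem.Dict.get?_empty]
  have hDBkeys : (zones.foldl (fun a z =>
      a.insert z (keys.foldl (fun d k => d.insert k (best.getD (z, k) 0)) PySem.Dict.empty))
      (PySem.Dict.empty : PySem.Dict String (PySem.Dict String Int))).keys = PySem.Set.ofList zones := by
    rw [PySem.Dict.keys_foldl_insert zones
      (fun _ z => keys.foldl (fun d k => d.insert k (best.getD (z, k) 0)) PySem.Dict.empty)
      PySem.Dict.empty, PySem.Dict.keys_empty, PySem.Set.update_nil_left]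
  have hRBkeys : ∀ z, (keys.foldl (fun d k => d.insert k (best.getD (z, k) 0)) PySem.Dict.empty).keys =
      PySem.Set.ofList keys := by
    intro z
    rw [PySem.Dict.keys_foldl_insert keys (fun _ k => best.getD (z, k) 0) PySem.Dict.empty,
      PySem.Dict.keys_empty, PySem.Set.update_nil_left]
  have hRBgetD : ∀ z, ∀ k ∈ keys,
      (keys.foldl (fun d k => d.insert k (best.getD (z, k) 0)) PySem.Dict.empty).getD k 0 =
      best.getD (z, k) 0 := by
    intro z k hk
    rw [PySem.Dict.getD_eq_get?_getD,
      pv_get?_foldl_insert keys (fun k => best.getD (z, k) 0) PySem.Dict.empty k, if_pos hk]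
    rfl
  -- both dicts have the same items
  apply PySem.Dict.ext
  rw [PySem.Dict.items_eq_map_keys _ (by rw [c1.trans hA0keys]; exact PySem.Set.nodup_ofList zones) PySem.Dict.empty,
    PySem.Dict.items_eq_map_keys _ (by rw [hDBkeys]; exact PySem.Set.nodup_ofList zones) PySem.Dict.empty,
    c1.trans hA0keys, hDBkeys]
  apply List.map_congr_left
  intro z hz
  rw [PySem.Set.mem_ofList] at hz
  have hDBrow : (zones.foldl (fun a z =>
      a.insert z (keys.foldl (fun d k => d.insert k (best.getD (z, k) 0)) PySem.Dict.empty))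
      (PySem.Dict.empty : PySem.Dict String (PySem.Dict String Int))).getD z PySem.Dict.empty =
      keys.foldl (fun d k => d.insert k (best.getD (z, k) 0)) PySem.Dict.empty := by
    rw [PySem.Dict.getD_eq_get?_getD, hDBget z, if_pos hz]
    rfl
  rw [hDBrow]
  have hArowkeys := c2 z ((hA0contains z).mpr hz)
  have hrow : (zones.foldl (fun a z =>
      keys.foldl (fun a k =>
        match PySem.List.max? (pvVals cam_data z k) (fun v => v) with
        | some m => a.modify z PySem.Dict.empty (fun row => row.insert k m)
        | none => a) a)
      (zones.foldl (fun a z => a.insert z rowInit) PySem.Dict.empty)).getD z PySem.Dict.empty =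
      keys.foldl (fun d k => d.insert k (best.getD (z, k) 0)) PySem.Dict.empty := by
    apply PySem.Dict.ext
    rw [PySem.Dict.items_eq_map_keys _ (by rw [hArowkeys]; exact PySem.Set.nodup_ofList keys) (0 : Int),
      PySem.Dict.items_eq_map_keys _ (by rw [hRBkeys z]; exact PySem.Set.nodup_ofList keys) (0 : Int),
      hArowkeys, hRBkeys z]
    apply List.map_congr_left
    intro k hk
    rw [PySem.Set.mem_ofList] at hk
    rw [c5 z hz k hk, hRBgetD z k hk, hbest z hz k hk]
  rw [hrow]

-- ===== VERDICT (by name: the statement is the Claim_ definition above) =====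
theorem aggregate_max_spec : Claim_equal_aggregate_max := by
  intro cam_data zones keys hdom hpre
  obtain ⟨hnd, hinner⟩ := hpre
  unfold Spec_aggregate_max
  show aggregate_max cam_data zones keys = aggregate_max_alt cam_data zones keys
  simp only [aggregate_max, aggregate_max_alt]
  have hval : ∀ z k : String, (cam_data.map Prod.fst).filterMap (fun cid =>
      match pyLookup cam_data cid with
      | none => none
      | some zd =>
        match pyLookup zd z with
        | none => none
        | some kd => some ((pyLookup kd k).getD 0)) = pvVals cam_data z k :=
    fun z k => pv_values_eq cam_data z k hnd
  simp only [hval]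
  rw [pv_ports_eq cam_data zones keys (fun p hp => (hinner p hp).1)]
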